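-- pv_equiv track=rewrite | github.com/NyraO/Robustness | generative.py | generative_attack
-- ===== SOURCE A (Python) =====
-- def generative_attack(text, token, n):
--     """
--     Insert a specific token every n words
--
--     Parameters:
--     - text: input watermarked text
--     - token: token to insert (e.g., "!")
--     - n: insert the token after every n words (n >= 1)
--
--     Returns: attacked text
--     """
--     words = text.split()
--     output_words = []
--
--     if n < 1:
--         raise ValueError("Parameter n must be at least 1")
--     elif n > len(words):
--         raise ValueError("Parameter n must be less than the number of words")
--
--     for i, word in enumerate(words, start=1):
--         output_words.append(word)
--         if i % n == 0:
--             output_words.append(token)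
--
--     return " ".join(output_words)
-- ===== SOURCE B (Python) =====
-- def generative_attack(text, token, n):
--     """
--     Insert a specific token every n words
--
--     Re-implementation: walks the word list chunk by chunk (slices of n words)
--     instead of counting indices, appending the token after each full chunk.
--     """
--     words = text.split()
--     if n < 1:
--         raise ValueError("Parameter n must be at least 1")
--     if n > len(words):
--         raise ValueError("Parameter n must be less than the number of words")
--     out = []
--     i = 0
--     while i < len(words):
--         g = words[i:i + n]
--         out.extend(g)
--         if len(g) == n:
--             out.append(token)
--         i += n
--     return " ".join(out)
-- ===== Notes on version B (the rewrite author's own statement) =====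
-- stated objective: alternative
-- what changed: Replaces the enumerate-and-modulo counting loop by a chunked walk: the word list is consumed in slices of n words, appending the token after each full chunk, with the two validation checks kept.
import Mathlib
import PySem

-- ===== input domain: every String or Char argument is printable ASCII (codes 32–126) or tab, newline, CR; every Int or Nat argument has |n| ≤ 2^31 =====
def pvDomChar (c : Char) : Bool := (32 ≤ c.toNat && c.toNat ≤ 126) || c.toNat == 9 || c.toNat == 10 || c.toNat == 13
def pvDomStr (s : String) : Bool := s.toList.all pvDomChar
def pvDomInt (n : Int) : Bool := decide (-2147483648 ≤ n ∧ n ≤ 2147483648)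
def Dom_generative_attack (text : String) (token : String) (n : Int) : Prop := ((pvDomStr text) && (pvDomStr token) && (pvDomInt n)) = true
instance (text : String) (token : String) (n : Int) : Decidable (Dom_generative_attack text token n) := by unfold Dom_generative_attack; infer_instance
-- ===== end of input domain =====

-- B rewrites A's enumerate-and-modulo loop as a chunked walk over slices of n words
-- (same cost; the two ValueError cases of both Pythons are excluded by Pre_).

-- ===== PORT A =====
-- the loop 'for i, word in enumerate(words, start=1): append word; if i % n == 0: append token'
def aLoop (token : String) (n : Int) (ps : List (Int × String)) (acc : List String) : List String :=
  ps.foldl (fun acc iw =>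
    let acc := acc ++ [iw.2]
    if PySem.Int.mod iw.1 n = 0 then acc ++ [token] else acc) acc

-- the two 'raise ValueError' branches return no value; Pre_ excludes exactly those inputs
def generative_attack (text : String) (token : String) (n : Int) : String :=
  let words := PySem.Str.split₀ text
  let output_words := aLoop token n (PySem.List.enumerate words 1) []
  PySem.Str.join " " output_words

-- ===== PORT B =====
-- the 'while i < len(words)' loop of Source B; the '0 < n' conjunct only totalises the
-- recursion (Source B has raised before the loop whenever n < 1)
def bLoop (words : List String) (token : String) (n : Int) (i : Int) (out : List String) : List String :=
  if h : i < (words.length : Int) ∧ 0 < n then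
    let g := PySem.List.slice words (some i) (some (i + n))
    let out := out ++ g
    let out := if (g.length : Int) = n then out ++ [token] else out
    bLoop words token n (i + n) out
  else out
termination_by ((words.length : Int) - i).toNat
decreasing_by omega

def generative_attack_alt (text : String) (token : String) (n : Int) : String :=
  let words := PySem.Str.split₀ text
  PySem.Str.join " " (bLoop words token n 0 [])

-- ===== PRECONDITION & SPEC =====
-- exactly the inputs where A returns normally: both Pythons raise ValueError when
-- n < 1 or n > len(words)
def Pre_generative_attack (text : String) (token : String) (n : Int) : Prop :=
  1 ≤ n ∧ n ≤ ((PySem.Str.split₀ text).length : Int)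
instance (text : String) (token : String) (n : Int) : Decidable (Pre_generative_attack text token n) := by unfold Pre_generative_attack; infer_instance

def pvWitness_generative_attack : String × String × Int := ("a b c d e", "!", 2)

def Spec_generative_attack (text : String) (token : String) (n : Int) (out : String) : Prop := out = generative_attack_alt text token n
instance (text : String) (token : String) (n : Int) (out : String) : Decidable (Spec_generative_attack text token n out) := by unfold Spec_generative_attack; infer_instance

-- ===== CLAIM (what is proved, stated in full; the proofs are below) =====
def Claim_equal_generative_attack : Prop := ∀ (text : String) (token : String) (n : Int), Dom_generative_attack text token n → Pre_generative_attack text token n → Spec_generative_attack text token n (generative_attack text token n)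

-- ===== LEMMAS AND PROOFS =====

-- Python's % agrees with Lean's emod for a positive divisor
theorem pymod_pos (a n : Int) (h : 0 < n) : PySem.Int.mod a n = a % n := by
  simp [PySem.Int.mod, Int.fmod_eq_emod]
  omega

-- recursive reading of A's loop
def specA (token : String) (n : Int) : Int → List String → List String
  | _, [] => []
  | s, w :: ws =>
    if PySem.Int.mod s n = 0 then w :: token :: specA token n (s + 1) ws
    else w :: specA token n (s + 1) ws

theorem aLoop_cons (token : String) (n : Int) (p : Int × String)
    (ps : List (Int × String)) (acc : List String) :
    aLoop token n (p :: ps) acc =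
      aLoop token n ps
        (if PySem.Int.mod p.1 n = 0 then acc ++ [p.2] ++ [token] else acc ++ [p.2]) := rfl

theorem aLoop_eq_specA (token : String) (n : Int) (ws : List String) (s : Int)
    (acc : List String) :
    aLoop token n (PySem.List.enumerate ws s) acc = acc ++ specA token n s ws := by
  induction ws generalizing s acc with
  | nil => simp [aLoop, specA, PySem.List.enumerate_nil]
  | cons w ws ih =>
    rw [PySem.List.enumerate_cons, aLoop_cons, ih]
    by_cases h : PySem.Int.mod s n = 0 <;> simp [specA, h]

theorem specA_append (token : String) (n : Int) (xs ys : List String) (s : Int) :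
    specA token n s (xs ++ ys) = specA token n s xs ++ specA token n (s + xs.length) ys := by
  induction xs generalizing s with
  | nil => simp [specA]
  | cons x xs ih =>
    simp only [List.cons_append, specA, ih]
    have : s + 1 + (xs.length : Int) = s + (x :: xs).length := by simp; ring
    rw [this]
    by_cases h : PySem.Int.mod s n = 0 <;> simp [h]

-- a block none of whose indices hits the modulus is copied unchanged
theorem specA_no_hit (token : String) (n : Int) (g : List String) (s : Int)
    (h : ∀ k : Nat, k < g.length → PySem.Int.mod (s + k) n ≠ 0) :
    specA token n s g = g := by
  induction g generalizing s with
  | nil => simp [specA]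
  | cons w ws ih =>
    have h0 : PySem.Int.mod s n ≠ 0 := by
      have := h 0 (by simp)
      simpa using this
    simp only [specA, h0, if_false]
    rw [ih]
    intro k hk
    have := h (k + 1) (by simp; omega)
    have e : s + 1 + (k : Int) = s + ((k + 1 : Nat) : Int) := by push_cast; ring
    rw [e]; exact this

-- a block whose single hit is its last index gets the token appended
theorem specA_hit_last (token : String) (n : Int) (g : List String) (s : Int)
    (hne : g ≠ [])
    (h : ∀ k : Nat, k < g.length → (PySem.Int.mod (s + k) n = 0 ↔ k = g.length - 1)) :
    specA token n s g = g ++ [token] := by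
  induction g generalizing s with
  | nil => exact absurd rfl hne
  | cons w ws ih =>
    by_cases hws : ws = []
    · subst hws
      have h0 : PySem.Int.mod s n = 0 := by
        have := (h 0 (by simp)).mpr (by simp)
        simpa using this
      simp [specA, h0]
    · have h0 : PySem.Int.mod s n ≠ 0 := by
        have hl := List.length_pos_of_ne_nil hws
        have := (h 0 (by simp)).not.mpr (by simp; omega)
        simpa using this
      simp only [specA, h0, if_false]
      rw [ih (s+1) hws]
      · simp
      · intro k hk
        have := h (k + 1) (by simp; omega)
        have e : s + 1 + (k : Int) = s + ((k + 1 : Nat) : Int) := by push_cast; ring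
        rw [e, this]
        have hl : 1 ≤ ws.length := List.length_pos_of_ne_nil hws
        simp
        omega

-- invariant of B's while loop: from index i (a multiple of n) it produces A's
-- output for the remaining words, whose 1-based global indices start at i+1
theorem bLoop_eq_specA (words : List String) (token : String) (n : Int)
    (hn : 1 ≤ n) :
    ∀ (m : Nat) (i : Int) (out : List String), 0 ≤ i → n ∣ i →
      (words.length : Int) - i ≤ (m : Int) →
      bLoop words token n i out = out ++ specA token n (i + 1) (words.drop i.toNat) := by
  intro m
  induction m with
  | zero =>
    intro i out hi hd hm
    rw [bLoop]
    have hL : (words.length : Int) ≤ i := by omega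
    have : ¬ (i < (words.length : Int) ∧ 0 < n) := by omega
    rw [dif_neg this]
    have : words.drop i.toNat = [] := by
      apply List.drop_eq_nil_of_le; omega
    simp [this, specA]
  | succ m ih =>
    intro i out hi hd hm
    rw [bLoop]
    by_cases hcond : i < (words.length : Int) ∧ 0 < n
    · rw [dif_pos hcond]
      dsimp only
      have hg : PySem.List.slice words (some i) (some (i + n)) =
          (words.drop i.toNat).take ((i + n).toNat - i.toNat) :=
        PySem.List.slice_toNat words hi (by omega : (0:Int) ≤ i + n)
      have htn : (i + n).toNat - i.toNat = n.toNat := by omega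
      set rest := words.drop i.toNat with hrest
      have hrlen : rest.length = words.length - i.toNat := by simp [hrest]
      have hsplit : rest = rest.take n.toNat ++ rest.drop n.toNat := by
        simp
      rw [hg, htn]
      by_cases hfull : ((rest.take n.toNat).length : Int) = n
      · -- full chunk: token appended, loop continues at i + n
        rw [if_pos hfull]
        have hlen : (rest.take n.toNat).length = n.toNat := by
          simp only [List.length_take] at hfull ⊢
          omega
        have hb1 : (0:Int) ≤ i + n := by omega
        have hb2 : (words.length : Int) - (i + n) ≤ (m : Int) := by omega
        have hrec := ih (i + n) (out ++ rest.take n.toNat ++ [token])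
          hb1 (dvd_add_self_right.mpr hd) hb2
        rw [hrec]
        have hdrop : words.drop (i + n).toNat = rest.drop n.toNat := by
          rw [hrest, List.drop_drop]
          congr 1
          omega
        rw [hdrop]
        conv_rhs => rw [hsplit]
        rw [specA_append]
        rw [specA_hit_last token n _ (i + 1) (by
          intro he; rw [he] at hlen; simp at hlen; omega)]
        · rw [hlen]
          have e : i + 1 + (n.toNat : Int) = i + n + 1 := by omega
          rw [e]
          simp
        · -- single hit at the last index of the chunk
          intro k hk
          rw [hlen] at hk
          rw [pymod_pos _ _ (by omega)]
          obtain ⟨q, hq⟩ := hd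
          constructor
          · intro hz
            have : (i + 1 + (k : Int)) % n = ((k : Int) + 1) % n := by
              rw [hq]
              have e : n * q + 1 + (k : Int) = ((k : Int) + 1) + q * n := by ring
              rw [e, Int.add_mul_emod_self_right _ _ _]
            rw [this] at hz
            have hlt : (k : Int) + 1 ≤ n := by omega
            by_cases hke : (k : Int) + 1 = n
            · rw [hlen]; omega
            · exfalso
              have : ((k : Int) + 1) % n = (k : Int) + 1 := Int.emod_eq_of_lt (by omega) (by omega)
              omega
          · intro hke
            rw [hlen] at hke
            have : (k : Int) = n - 1 := by omega
            rw [hq, this]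
            have e : n * q + 1 + (n - 1) = (q + 1) * n := by ring
            rw [e]
            simp
      · -- partial final chunk: no token, and the loop terminates next round
        rw [if_neg hfull]
        have hlt : rest.length < n.toNat := by
          by_contra hge
          apply hfull
          simp [List.length_take]
          omega
        have hb1 : (0:Int) ≤ i + n := by omega
        have hb2 : (words.length : Int) - (i + n) ≤ (m : Int) := by omega
        have hrec := ih (i + n) (out ++ rest.take n.toNat)
          hb1 (dvd_add_self_right.mpr hd) hb2
        rw [hrec]
        have hdrop : words.drop (i + n).toNat = rest.drop n.toNat := by
          rw [hrest, List.drop_drop]; congr 1; omega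
        have hrd : rest.drop n.toNat = [] := List.drop_eq_nil_of_le (by omega)
        have hrt : rest.take n.toNat = rest := List.take_of_length_le (by omega)
        rw [hdrop, hrd]
        simp only [specA, List.append_nil]
        rw [hrt]
        rw [specA_no_hit]
        intro k hk
        rw [pymod_pos _ _ (by omega)]
        obtain ⟨q, hq⟩ := hd
        have : (i + 1 + (k : Int)) % n = ((k : Int) + 1) % n := by
          rw [hq]
          have e : n * q + 1 + (k : Int) = ((k : Int) + 1) + q * n := by ring
          rw [e, Int.add_mul_emod_self_right _ _ _]
        rw [this]
        have : ((k : Int) + 1) % n = (k : Int) + 1 := Int.emod_eq_of_lt (by omega) (by omega)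
        omega
    · rw [dif_neg hcond]
      have : words.drop i.toNat = [] := List.drop_eq_nil_of_le (by omega)
      simp [this, specA]

-- ===== VERDICT (by name: the statement is the Claim_ definition above) =====
theorem generative_attack_spec : Claim_equal_generative_attack := by
  intro text token n _ hpre
  obtain ⟨hn, _⟩ := hpre
  unfold Spec_generative_attack generative_attack generative_attack_alt
  dsimp only
  congr 1
  rw [aLoop_eq_specA]
  rw [bLoop_eq_specA _ _ _ hn (PySem.Str.split₀ text).length 0 [] (by omega) (by simp) (by omega)]
  simp
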